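-- pv_equiv track=rewrite | github.com/fergunet/AdventOfCode24 | 7b.py | reduce_operands
-- ===== SOURCE A (Python) =====
-- def reduce_operands(operands,c):
-- 	new_operands = []
-- 	new_combs = []
-- 	new_operands.append(operands[0])
-- 	for i in range(0,len(operands)-1):
-- 		if(c[i] == 2):
-- 			old = new_operands[-1]
-- 			new = operands[i+1]
-- 			oldnew = str(old)+str(new)
-- 			new_operands[-1]=int(oldnew)
-- 		else:
-- 			new_combs.append(c[i])
-- 			new_operands.append(operands[i+1])
--
-- 	return new_operands,new_combs
-- ===== SOURCE B (Python) =====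
-- def _cat(a, b):
--     return int(str(a) + str(b))
--
--
-- def reduce_operands(operands, c):
--     k = len(operands) - 1
--     # phase 1: partition operands into maximal concatenation runs
--     runs = [[operands[0]]]
--     for i in range(k):
--         if c[i] == 2:
--             runs[-1].append(operands[i + 1])
--         else:
--             runs.append([operands[i + 1]])
--     # phase 2: reduce each run by concatenation, keep the non-concat codes
--     new_operands = []
--     for run in runs:
--         v = run[0]
--         for x in run[1:]:
--             v = _cat(v, x)
--         new_operands.append(v)
--     new_combs = [c[i] for i in range(k) if c[i] != 2]
--     return new_operands, new_combs
-- ===== Notes on version B (the rewrite author's own statement) =====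
-- stated objective: alternative
-- what changed: A's single eager pass that keeps mutating the last accumulated operand is replaced by a partition-then-reduce decomposition: first build the concatenation runs, then reduce each run with _cat and compute the surviving codes by a filter comprehension.
import Mathlib
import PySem

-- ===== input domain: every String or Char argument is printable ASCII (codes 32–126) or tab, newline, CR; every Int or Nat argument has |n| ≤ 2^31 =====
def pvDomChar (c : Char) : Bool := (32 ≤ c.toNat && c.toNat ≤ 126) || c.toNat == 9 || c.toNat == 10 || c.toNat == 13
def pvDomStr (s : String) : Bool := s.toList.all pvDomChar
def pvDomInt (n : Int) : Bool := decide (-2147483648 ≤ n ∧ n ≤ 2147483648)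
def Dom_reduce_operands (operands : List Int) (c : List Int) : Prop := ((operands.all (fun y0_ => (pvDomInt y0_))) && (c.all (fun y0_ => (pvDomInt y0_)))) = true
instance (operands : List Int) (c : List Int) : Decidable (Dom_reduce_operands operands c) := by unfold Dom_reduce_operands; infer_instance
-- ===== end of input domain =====

-- B replaces A's single eager pass (mutating the last accumulated operand) by a
-- partition-then-reduce decomposition: build the concatenation runs first, then reduce
-- each run and filter the codes (objective: alternative decomposition, same cost).

-- ===== PORT A =====
-- state is (new_operands, new_combs); new_operands[-1] = int(oldnew) is ported as
-- dropLast ++ [·], exact because new_operands is always nonempty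
def reduce_operands (operands : List Int) (c : List Int) : List Int × List Int :=
  (PySem.List.pyRange 0 (PySem.List.len operands - 1) 1).foldl
    (fun (st : List Int × List Int) i =>
      if PySem.List.pyGetD c i 0 == 2 then
        (st.1.dropLast ++
          [(PySem.Int.ofChars?
              (PySem.Int.toChars ((PySem.List.pyGet? st.1 (-1)).getD 0) ++
               PySem.Int.toChars (PySem.List.pyGetD operands (i + 1) 0))).getD 0],
         st.2)
      else
        (st.1 ++ [PySem.List.pyGetD operands (i + 1) 0],
         st.2 ++ [PySem.List.pyGetD c i 0]))
    ([(PySem.List.pyGet? operands 0).getD 0], [])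

-- ===== PORT B =====
-- _cat(a, b) = int(str(a) + str(b))
def pyCat (a b : Int) : Int :=
  (PySem.Int.ofChars? (PySem.Int.toChars a ++ PySem.Int.toChars b)).getD 0

-- v = run[0]; for x in run[1:]: v = _cat(v, x)
def catRun (run : List Int) : Int := (run.drop 1).foldl pyCat (run.headD 0)

def reduce_operands_alt (operands : List Int) (c : List Int) : List Int × List Int :=
  let k := PySem.List.len operands - 1
  let runs := (PySem.List.pyRange 0 k 1).foldl
    (fun (runs : List (List Int)) i =>
      if PySem.List.pyGetD c i 0 == 2 then
        -- runs[-1].append(operands[i+1])  (runs is always nonempty)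
        runs.dropLast ++ [runs.getLastD [] ++ [PySem.List.pyGetD operands (i + 1) 0]]
      else
        runs ++ [[PySem.List.pyGetD operands (i + 1) 0]])
    [[(PySem.List.pyGet? operands 0).getD 0]]
  (runs.map catRun,
   ((PySem.List.pyRange 0 k 1).filter
      (fun i => !(PySem.List.pyGetD c i 0 == 2))).map
     (fun i => PySem.List.pyGetD c i 0))

-- ===== PRECONDITION & SPEC =====
-- Pre_ excludes exactly the inputs where Python A raises: IndexError on empty operands
-- or on c shorter than len(operands)-1, and ValueError when a concatenated-in operand
-- is negative (int("…-…")).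
def Pre_reduce_operands (operands : List Int) (c : List Int) : Prop :=
  operands ≠ [] ∧ operands.length - 1 ≤ c.length ∧
    ∀ i < operands.length - 1, c.getD i 0 = 2 → 0 ≤ operands.getD (i + 1) 0
instance (operands : List Int) (c : List Int) : Decidable (Pre_reduce_operands operands c) := by
  unfold Pre_reduce_operands; infer_instance

def pvWitness_reduce_operands : List Int × List Int := ([12, 34, 5], [2, 0])

def Spec_reduce_operands (operands : List Int) (c : List Int) (out : List Int × List Int) : Prop := out = reduce_operands_alt operands c
instance (operands : List Int) (c : List Int) (out : List Int × List Int) : Decidable (Spec_reduce_operands operands c out) := by unfold Spec_reduce_operands; infer_instance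

-- ===== CLAIM (what is proved, stated in full; the proofs are below) =====
def Claim_equal_reduce_operands : Prop := ∀ (operands : List Int) (c : List Int), Dom_reduce_operands operands c → Pre_reduce_operands operands c → Spec_reduce_operands operands c (reduce_operands operands c)

-- ===== LEMMAS AND PROOFS =====

theorem catRun_singleton (x : Int) : catRun [x] = x := by simp [catRun]

theorem catRun_append (r : List Int) (hr : r ≠ []) (x : Int) :
    catRun (r ++ [x]) = pyCat (catRun r) x := by
  cases r with
  | nil => exact absurd rfl hr
  | cons y t => simp [catRun, List.foldl_append]

-- A's new_operands state is the image under catRun of B's runs state, for any index list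
theorem runs_sim (operands c : List Int) (L : List Int) :
    ∀ (runs : List (List Int)) (combs : List Int), runs ≠ [] → (∀ r ∈ runs, r ≠ []) →
    L.foldl
      (fun (st : List Int × List Int) i =>
        if PySem.List.pyGetD c i 0 == 2 then
          (st.1.dropLast ++
            [(PySem.Int.ofChars?
                (PySem.Int.toChars ((PySem.List.pyGet? st.1 (-1)).getD 0) ++
                 PySem.Int.toChars (PySem.List.pyGetD operands (i + 1) 0))).getD 0],
           st.2)
        else
          (st.1 ++ [PySem.List.pyGetD operands (i + 1) 0],
           st.2 ++ [PySem.List.pyGetD c i 0]))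
      (runs.map catRun, combs)
    = ((L.foldl
          (fun (runs : List (List Int)) i =>
            if PySem.List.pyGetD c i 0 == 2 then
              runs.dropLast ++ [runs.getLastD [] ++ [PySem.List.pyGetD operands (i + 1) 0]]
            else
              runs ++ [[PySem.List.pyGetD operands (i + 1) 0]]) runs).map catRun,
       L.foldl
          (fun (combs : List Int) i =>
            if PySem.List.pyGetD c i 0 == 2 then combs
            else combs ++ [PySem.List.pyGetD c i 0]) combs) := by
  induction L with
  | nil => intro runs combs _ _; rfl
  | cons a L ih =>
    intro runs combs hne hmem
    by_cases h : PySem.List.pyGetD c a 0 == 2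
    · simp only [List.foldl_cons, h, if_pos]
      have hlast : runs.getLast? = some (runs.getLastD []) := by
        obtain ⟨x, hx⟩ := Option.isSome_iff_exists.mp (List.getLast?_isSome.mpr hne)
        rw [List.getLastD_eq_getLast?, hx]; rfl
      have h1 : (runs.map catRun).dropLast = runs.dropLast.map catRun :=
        Eq.symm List.map_dropLast
      have h2 : (PySem.List.pyGet? (runs.map catRun) (-1)).getD 0
          = catRun (runs.getLastD []) := by
        rw [PySem.List.pyGet?_neg_one, List.getLast?_map, hlast]; rfl
      have h3 : (runs.map catRun).dropLast ++
            [(PySem.Int.ofChars?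
                (PySem.Int.toChars ((PySem.List.pyGet? (runs.map catRun) (-1)).getD 0) ++
                 PySem.Int.toChars (PySem.List.pyGetD operands (a + 1) 0))).getD 0]
          = (runs.dropLast ++ [runs.getLastD [] ++ [PySem.List.pyGetD operands (a + 1) 0]]).map catRun := by
        rw [h1, h2, List.map_append, List.map_singleton,
          catRun_append _ (hmem _ (List.mem_of_getLast? hlast))]
        rfl
      rw [h3]
      exact ih _ _ (by simp) (by
        intro r hr
        rcases List.mem_append.1 hr with h' | h'
        · exact hmem r (List.dropLast_subset _ h')
        · simp at h'; subst h'; simp)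
    · simp only [List.foldl_cons, h, Bool.false_eq_true, if_false]
      have h4 : (runs.map catRun) ++ [PySem.List.pyGetD operands (a + 1) 0]
          = (runs ++ [[PySem.List.pyGetD operands (a + 1) 0]]).map catRun := by
        rw [List.map_append]; simp [catRun_singleton]
      rw [h4]
      exact ih _ _ (by simp) (by
        intro r hr
        rcases List.mem_append.1 hr with h' | h'
        · exact hmem r h'
        · simp at h'; subst h'; simp)

-- the skip/append comb loop is the filter-map B computes
theorem combs_filter (c : List Int) (L : List Int) (acc : List Int) :
    L.foldl
      (fun (combs : List Int) i =>
        if PySem.List.pyGetD c i 0 == 2 then combs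
        else combs ++ [PySem.List.pyGetD c i 0]) acc
    = acc ++ (L.filter (fun i => !(PySem.List.pyGetD c i 0 == 2))).map
        (fun i => PySem.List.pyGetD c i 0) := by
  have hfun : (fun (combs : List Int) i =>
        if PySem.List.pyGetD c i 0 == 2 then combs
        else combs ++ [PySem.List.pyGetD c i 0])
      = (fun (combs : List Int) i =>
        if (!(PySem.List.pyGetD c i 0 == 2)) = true then
          combs ++ [PySem.List.pyGetD c i 0] else combs) := by
    funext combs i
    cases h : PySem.List.pyGetD c i 0 == 2 <;> simp
  rw [hfun, PySem.List.foldl_append_if]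

-- ===== VERDICT (by name: the statement is the Claim_ definition above) =====
theorem reduce_operands_spec : Claim_equal_reduce_operands := by
  intro operands c _ _
  unfold Spec_reduce_operands reduce_operands reduce_operands_alt
  have h0 : ([(PySem.List.pyGet? operands 0).getD 0] : List Int)
      = ([[(PySem.List.pyGet? operands 0).getD 0]] : List (List Int)).map catRun := by
    simp [catRun_singleton]
  rw [h0, runs_sim operands c _ _ [] (by simp) (by simp), combs_filter]
  rfl
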